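-- pv_equiv track=rewrite | github.com/faria1305/Text-to-Python-Code-Generation-Using-Seq2Seq-Models | src/utils.py | strip_special
-- ===== SOURCE A (Python) =====
-- from typing import Any, Dict, List, Optional
--
-- def strip_special(tokens: List[int], bos_id: int, eos_id: int, pad_id: int) -> List[int]:
--     out: List[int] = []
--     for t in tokens:
--         if t in (pad_id, bos_id):
--             continue
--         if t == eos_id:
--             break
--         out.append(t)
--     return out
-- ===== SOURCE B (Python) =====
-- def strip_special(tokens, bos_id, eos_id, pad_id):
--     # Pass 1: find the cut point — first EOS that is not also pad/bos.
--     cut = len(tokens)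
--     for i, t in enumerate(tokens):
--         if t == eos_id and t != pad_id and t != bos_id:
--             cut = i
--             break
--     # Pass 2: drop pad/bos markers from the prefix.
--     return [t for t in tokens[:cut] if t != pad_id and t != bos_id]
-- ===== Notes on version B (the rewrite author's own statement) =====
-- stated objective: alternative
-- what changed: Replaces the single interleaved loop with continue/break by two separate passes: first find the cut index of the first effective EOS, then filter pad/bos out of that prefix.
import Mathlib
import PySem

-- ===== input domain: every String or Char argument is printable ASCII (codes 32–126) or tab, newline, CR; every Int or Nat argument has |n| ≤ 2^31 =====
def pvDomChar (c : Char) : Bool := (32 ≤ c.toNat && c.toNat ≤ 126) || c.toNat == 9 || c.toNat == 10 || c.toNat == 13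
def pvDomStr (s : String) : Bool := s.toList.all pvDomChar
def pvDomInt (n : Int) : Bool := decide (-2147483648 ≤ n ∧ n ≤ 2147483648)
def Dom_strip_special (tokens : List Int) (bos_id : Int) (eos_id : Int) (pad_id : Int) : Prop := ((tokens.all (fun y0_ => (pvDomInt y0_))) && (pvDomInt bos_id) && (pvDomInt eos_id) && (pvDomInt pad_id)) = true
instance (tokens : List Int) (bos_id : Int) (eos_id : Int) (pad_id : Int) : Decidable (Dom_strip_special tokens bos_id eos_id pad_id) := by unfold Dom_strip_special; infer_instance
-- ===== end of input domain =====

-- B separates A's interleaved continue/break loop into two passes: find the cut at the first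
-- effective EOS, then filter pad/bos from that prefix (alternative decomposition, same cost).


-- ===== PORT A =====
-- loop with continue/break, accumulating out; ported as structural recursion over tokens
def stripLoopA (tokens : List Int) (bos_id : Int) (eos_id : Int) (pad_id : Int) : List Int :=
  match tokens with
  | [] => []
  | t :: ts =>
    if t = pad_id ∨ t = bos_id then stripLoopA ts bos_id eos_id pad_id
    else if t = eos_id then []
    else t :: stripLoopA ts bos_id eos_id pad_id

def strip_special (tokens : List Int) (bos_id : Int) (eos_id : Int) (pad_id : Int) : List Int :=
  stripLoopA tokens bos_id eos_id pad_id

-- ===== PORT B =====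
-- pass 1: prefix before the first effective EOS (the cut); pass 2: filter pad/bos from it
def strip_special_alt (tokens : List Int) (bos_id : Int) (eos_id : Int) (pad_id : Int) : List Int :=
  (tokens.takeWhile (fun t => !(t == eos_id && t != pad_id && t != bos_id))).filter
    (fun t => t != pad_id && t != bos_id)

-- ===== PRECONDITION & SPEC =====
def Spec_strip_special (tokens : List Int) (bos_id : Int) (eos_id : Int) (pad_id : Int) (out : List Int) : Prop := out = strip_special_alt tokens bos_id eos_id pad_id
instance (tokens : List Int) (bos_id : Int) (eos_id : Int) (pad_id : Int) (out : List Int) : Decidable (Spec_strip_special tokens bos_id eos_id pad_id out) := by unfold Spec_strip_special; infer_instance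

-- ===== CLAIM (what is proved, stated in full; the proofs are below) =====
def Claim_equal_strip_special : Prop := ∀ (tokens : List Int) (bos_id : Int) (eos_id : Int) (pad_id : Int), Dom_strip_special tokens bos_id eos_id pad_id → Spec_strip_special tokens bos_id eos_id pad_id (strip_special tokens bos_id eos_id pad_id)

-- ===== LEMMAS AND PROOFS =====
theorem stripLoopA_eq (tokens : List Int) (bos_id eos_id pad_id : Int) :
    stripLoopA tokens bos_id eos_id pad_id = strip_special_alt tokens bos_id eos_id pad_id := by
  induction tokens with
  | nil => rfl
  | cons t ts ih =>
    unfold strip_special_alt at ih ⊢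
    by_cases hp : t = pad_id
    · simp [stripLoopA, hp, ih]
    · by_cases hb : t = bos_id
      · simp [stripLoopA, hb, ih]
      · by_cases he : t = eos_id
        · subst he; simp [stripLoopA, hp, hb]
        · simp [stripLoopA, he, hp, hb, ih]

-- ===== VERDICT (by name: the statement is the Claim_ definition above) =====
theorem strip_special_spec : Claim_equal_strip_special := by
  intro tokens bos_id eos_id pad_id _
  unfold Spec_strip_special strip_special
  exact stripLoopA_eq tokens bos_id eos_id pad_id
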